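-- pv_equiv track=rewrite | github.com/lindameng-0/Roundtable | backend/services/manuscript.py | _chapter_ranges
-- ===== SOURCE A (Python) =====
-- from typing import List, Dict, Tuple
--
-- def _chapter_ranges(parsed: List[Tuple[str, str]]) -> List[Tuple[int, int]]:
--     """Return list of (start_idx, end_idx) for each chapter. Chapters are split on chapter/scene breaks."""
--     if not parsed:
--         return []
--     starts = [0]
--     for i in range(len(parsed)):
--         if parsed[i][1] == "chapter":
--             starts.append(i + 1)
--     ranges: List[Tuple[int, int]] = []
--     for j in range(len(starts)):
--         s = starts[j]
--         e = starts[j + 1] if j + 1 < len(starts) else len(parsed)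
--         if s < e:
--             ranges.append((s, e))
--     return ranges
-- ===== SOURCE B (Python) =====
-- from typing import List, Tuple
--
-- def _chapter_ranges(parsed: List[Tuple[str, str]]) -> List[Tuple[int, int]]:
--     """Return list of (start_idx, end_idx) for each chapter. Chapters are split on chapter/scene breaks."""
--     ranges: List[Tuple[int, int]] = []
--     start = 0
--     for i, (_, kind) in enumerate(parsed):
--         if kind == "chapter":
--             ranges.append((start, i + 1))
--             start = i + 1
--     if start < len(parsed):
--         ranges.append((start, len(parsed)))
--     return ranges
-- ===== Notes on version B (the rewrite author's own statement) =====
-- stated objective: simpler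
-- what changed: One pass with a running start index that emits each range as its chapter break is seen, replacing A's two-pass scheme that first materializes a list of all split points and then pairs them up; only the trailing range needs an emptiness guard.
import Mathlib
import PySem

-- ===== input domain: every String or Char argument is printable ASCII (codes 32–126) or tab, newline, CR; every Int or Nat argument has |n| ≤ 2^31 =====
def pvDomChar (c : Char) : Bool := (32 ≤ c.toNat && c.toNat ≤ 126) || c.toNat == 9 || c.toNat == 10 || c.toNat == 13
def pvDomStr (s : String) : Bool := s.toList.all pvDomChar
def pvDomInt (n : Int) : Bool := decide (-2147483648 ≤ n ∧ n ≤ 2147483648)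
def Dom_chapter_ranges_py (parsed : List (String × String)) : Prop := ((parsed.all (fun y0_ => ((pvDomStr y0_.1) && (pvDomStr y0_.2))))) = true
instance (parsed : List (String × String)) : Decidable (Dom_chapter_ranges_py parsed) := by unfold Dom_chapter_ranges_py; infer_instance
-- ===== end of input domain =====

-- B replaces A's two-pass split-points-then-pair-up scheme by a single pass with a
-- running start index (simpler decomposition; same O(n) cost, return value identical).


-- ===== PORT A =====
-- first loop of A: collect i+1 for every index i with parsed[i][1] == "chapter"
def pvStartsGo : List (String × String) → Int → List Int
  | [], _ => []
  | (_, k) :: rest, i =>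
      (if k == "chapter" then [i + 1] else []) ++ pvStartsGo rest (i + 1)

-- second loop of A: for each j, s = starts[j], e = starts[j+1] (or len(parsed)); keep (s,e) if s < e
def pvPairUp : List Int → Int → List (Int × Int)
  | [], _ => []
  | [s], n => if s < n then [(s, n)] else []
  | s :: e :: rest, n =>
      (if s < e then [(s, e)] else []) ++ pvPairUp (e :: rest) n

def chapter_ranges_py (parsed : List (String × String)) : List (Int × Int) :=
  if parsed.isEmpty then []
  else
    let starts : List Int := 0 :: pvStartsGo parsed 0
    pvPairUp starts (parsed.length : Int)

-- ===== PORT B =====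
-- single pass: running start; emit (start, i+1) at each chapter break, trailing range guarded
def pvAltGo : List (String × String) → Int → Int → Int → List (Int × Int)
  | [], start, _, n => if start < n then [(start, n)] else []
  | (_, k) :: rest, start, i, n =>
      if k == "chapter" then (start, i + 1) :: pvAltGo rest (i + 1) (i + 1) n
      else pvAltGo rest start (i + 1) n

def chapter_ranges_py_alt (parsed : List (String × String)) : List (Int × Int) :=
  pvAltGo parsed 0 0 (parsed.length : Int)

-- ===== PRECONDITION & SPEC =====
def Spec_chapter_ranges_py (parsed : List (String × String)) (out : List (Int × Int)) : Prop := out = chapter_ranges_py_alt parsed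
instance (parsed : List (String × String)) (out : List (Int × Int)) : Decidable (Spec_chapter_ranges_py parsed out) := by unfold Spec_chapter_ranges_py; infer_instance

-- ===== CLAIM (what is proved, stated in full; the proofs are below) =====
def Claim_equal_chapter_ranges_py : Prop := ∀ (parsed : List (String × String)), Dom_chapter_ranges_py parsed → Spec_chapter_ranges_py parsed (chapter_ranges_py parsed)

-- ===== LEMMAS AND PROOFS =====
-- With start ≤ i, B's single pass equals pairing up (start :: split points from position i).
theorem pvAltGo_eq_pairUp (n : Int) :
    ∀ (l : List (String × String)) (i start : Int), start ≤ i →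
      pvAltGo l start i n = pvPairUp (start :: pvStartsGo l i) n := by
  intro l
  induction l with
  | nil => intro i start _; simp [pvAltGo, pvStartsGo, pvPairUp]
  | cons hd tl ih =>
      intro i start hle
      obtain ⟨_, k⟩ := hd
      by_cases hk : k == "chapter"
      · have h1 : start < i + 1 := by omega
        simp [pvAltGo, pvStartsGo, pvPairUp, hk, h1, ih (i + 1) (i + 1) le_rfl]
      · simp [pvAltGo, pvStartsGo, hk, ih (i + 1) start (by omega)]

-- ===== VERDICT (by name: the statement is the Claim_ definition above) =====
theorem chapter_ranges_py_spec : Claim_equal_chapter_ranges_py := by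
  intro parsed _
  unfold Spec_chapter_ranges_py chapter_ranges_py chapter_ranges_py_alt
  cases parsed with
  | nil => simp [pvAltGo]
  | cons hd tl =>
      simp only [List.isEmpty_cons]
      rw [pvAltGo_eq_pairUp _ (hd :: tl) 0 0 le_rfl]
      simp
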